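-- pv_equiv track=rewrite | github.com/animeshokhade/dsa | scaler/Unset x bits from right.py | solve
-- ===== SOURCE A (Python) =====
-- def solve(A, B):
--     ans = A
--     bitIndex = 0
--     for _ in range(B):
--         if A & 1:
--             ans -= 1 << bitIndex
--         bitIndex += 1
--         A >>= 1
--     return ans
-- ===== SOURCE B (Python) =====
-- def solve(A, B):
--     if B <= 0:
--         return A
--     return (A >> B) << B
-- ===== Notes on version B (the rewrite author's own statement) =====
-- stated objective: faster
-- what changed: Replaced the per-bit loop (subtracting each set low bit) with a single arithmetic shift pair (A >> B) << B that clears the B lowest bits at once.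
import Mathlib
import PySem

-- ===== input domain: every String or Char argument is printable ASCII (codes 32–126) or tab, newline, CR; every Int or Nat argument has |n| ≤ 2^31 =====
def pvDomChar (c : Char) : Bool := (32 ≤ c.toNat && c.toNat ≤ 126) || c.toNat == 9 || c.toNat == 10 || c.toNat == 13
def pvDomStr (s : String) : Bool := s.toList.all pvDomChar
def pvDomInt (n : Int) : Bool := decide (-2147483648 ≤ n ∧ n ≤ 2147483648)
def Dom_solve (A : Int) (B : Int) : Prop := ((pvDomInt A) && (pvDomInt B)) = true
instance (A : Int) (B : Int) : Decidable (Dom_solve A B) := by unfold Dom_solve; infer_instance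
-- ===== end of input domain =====

-- B clears the B lowest bits with one shift pair (A >> B) << B instead of A's per-bit loop; faster (O(1) vs O(B) big-int ops).

-- ===== PORT A =====
-- loop state (ans, bitIndex, a); bitIndex only takes values 0,1,2,… so it is carried as a Nat
-- and Python's `1 << bitIndex` is exactly `2 ^ bitIndex`; `A & 1` is PySem.Int.band a 1 (truthiness: ≠ 0);
-- `A >>= 1` is Python floor division by 2 (arithmetic shift), exactly PySem.Int.floordiv a 2.
def solve (A : Int) (B : Int) : Int :=
  ((PySem.List.pyRange 0 B).foldl
    (fun (st : Int × Nat × Int) (_ : Int) =>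
      let ans := st.1
      let bitIndex := st.2.1
      let a := st.2.2
      let ans := if PySem.Int.band a 1 ≠ 0 then ans - 2 ^ bitIndex else ans
      (ans, bitIndex + 1, PySem.Int.floordiv a 2))
    (A, 0, A)).1

-- ===== PORT B =====
-- Python `A >> B` (arithmetic right shift, B > 0) is exactly floor division by 2^B,
-- and `x << B` is exactly x * 2^B.
def solve_alt (A : Int) (B : Int) : Int :=
  if B ≤ 0 then A
  else PySem.Int.floordiv A (2 ^ B.toNat) * 2 ^ B.toNat

-- ===== PRECONDITION & SPEC =====
def Spec_solve (A : Int) (B : Int) (out : Int) : Prop := out = solve_alt A B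
instance (A : Int) (B : Int) (out : Int) : Decidable (Spec_solve A B out) := by unfold Spec_solve; infer_instance

-- ===== CLAIM (what is proved, stated in full; the proofs are below) =====
def Claim_equal_solve : Prop := ∀ (A : Int) (B : Int), Dom_solve A B → Spec_solve A B (solve A B)

-- ===== LEMMAS AND PROOFS =====

-- one modulus-doubling step: splitting A at P and then the quotient at 2 is splitting A at P*2
theorem pv_split (A P : Int) (hP : 0 < P) :
    A % (P * 2) = A % P + P * (A / P % 2) ∧ A / (P * 2) = A / P / 2 := by
  have hdiv : A / (P * 2) = A / P / 2 := (Int.ediv_ediv_of_nonneg (le_of_lt hP)).symm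
  refine ⟨?_, hdiv⟩
  have h1 := Int.emod_def A (P * 2)
  have h2 := Int.emod_def A P
  have h3 := Int.emod_def (A / P) 2
  rw [h1, h2, h3, hdiv]; ring

-- the step function of A's loop
def pv_step : Int × Nat × Int → Int × Nat × Int :=
  fun st =>
    let ans := st.1
    let bitIndex := st.2.1
    let a := st.2.2
    let ans := if PySem.Int.band a 1 ≠ 0 then ans - 2 ^ bitIndex else ans
    (ans, bitIndex + 1, PySem.Int.floordiv a 2)

-- loop invariant: after n iterations the state is (A - A % 2^n, n, A / 2^n)
theorem pv_iter (A : Int) : ∀ n : Nat,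
    pv_step^[n] (A, 0, A) = (A - A % 2 ^ n, n, A / 2 ^ n) := by
  intro n
  induction n with
  | zero => simp
  | succ n ih =>
    rw [Function.iterate_succ_apply', ih]
    have h2 : (0:Int) < 2 := by norm_num
    have hP : (0:Int) < 2 ^ n := by positivity
    obtain ⟨hm, hd⟩ := pv_split A (2 ^ n) hP
    have hpow : (2:Int) ^ (n + 1) = 2 ^ n * 2 := by ring
    simp only [pv_step, PySem.Int.band_one, PySem.Int.mod_eq_emod_of_pos h2,
      PySem.Int.floordiv_eq_ediv_of_pos h2]
    rcases Int.emod_two_eq (A / 2 ^ n) with hb | hb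
    · rw [if_neg (by omega)]
      refine Prod.ext ?_ (Prod.ext rfl ?_)
      · rw [hpow, hm, hb]; ring
      · rw [hpow, hd]
    · rw [if_pos (by omega)]
      refine Prod.ext ?_ (Prod.ext rfl ?_)
      · rw [hpow, hm, hb]; ring
      · rw [hpow, hd]

-- ===== VERDICT (by name: the statement is the Claim_ definition above) =====
theorem solve_spec : Claim_equal_solve := by
  intro A B _
  unfold Spec_solve solve solve_alt
  by_cases hB : B ≤ 0
  · have hnil : PySem.List.pyRange 0 B = [] := by
      simp [PySem.List.pyRange]; omega
    simp [hnil, hB]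
  · rw [Int.not_le] at hB
    have hcast : B = (B.toNat : Int) := by omega
    rw [hcast, PySem.List.pyRange_zero_natCast]
    have hstep : (fun (st : Int × Nat × Int) (_ : Int) =>
        let ans := st.1
        let bitIndex := st.2.1
        let a := st.2.2
        let ans := if PySem.Int.band a 1 ≠ 0 then ans - 2 ^ bitIndex else ans
        (ans, bitIndex + 1, PySem.Int.floordiv a 2))
        = (fun (st : Int × Nat × Int) (_ : Int) => pv_step st) := rfl
    rw [hstep, List.foldl_const, pv_iter]
    have hP : (0:Int) < 2 ^ B.toNat := by positivity
    rw [if_neg (by omega : ¬ (B.toNat : Int) ≤ 0)]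
    simp only [List.length_map, List.length_range, Int.toNat_natCast]
    rw [PySem.Int.floordiv_eq_ediv_of_pos hP, Int.emod_def]
    ring
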